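-- pv_equiv track=rewrite | github.com/DandyQi/MaskedCRF | slot_eval.py | get_slot_tokens
-- ===== SOURCE A (Python) =====
-- def split_tag(chunk_tag):
--     """
--     split chunk tag into IOBES prefix and chunk_type
--     e.g.
--     B-PER -> (B, PER)
--     O -> (O, None)
--     """
--     if chunk_tag in {'O', ""}:
--         return 'O', None
--     tags = chunk_tag.split('-')
--     if len(tags) == 2:
--         return tags
--     else:
--         return 'O', None
--
-- def is_previous_chunk_end(prev_tag, tag):
--     """
--     check if the previous chunk ended between the previous and current word
--     e.g.
--     (B-PER, I-PER) -> False
--     (B-LOC, O)  -> True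
--
--     Note: in case of contradicting tags, e.g. (B-PER, I-LOC)
--     this is considered as (B-PER, B-LOC)
--     """
--     prefix1, chunk_type1 = split_tag(prev_tag)
--     prefix2, chunk_type2 = split_tag(tag)
--
--     if prefix1 == 'O':
--         return False
--     if prefix2 == 'O':
--         return prefix1 != 'O'
--
--     if chunk_type1 != chunk_type2:
--         return True
--
--     return prefix2 in ['B', 'S'] or prefix1 in ['E', 'S']
--
-- def is_current_chunk_start(prev_tag, tag):
--     """
--     check if a new chunk started between the previous and current word
--     判断当前tag是否为一个starting tag，例如：
--     (B-PER, I-PER) -> False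
--     (B-LOC, O)  -> False
--
--     (B-PER, B-PER) -> True
--     (B-LOC, B-PER)  -> True
--     """
--     prefix1, chunk_type1 = split_tag(prev_tag)
--     prefix2, chunk_type2 = split_tag(tag)
--
--     if prefix2 == 'O':
--         return False
--     if prefix1 == 'O':
--         return prefix2 != 'O'
--
--     if chunk_type1 != chunk_type2:
--         return True
--
--     return prefix2 in ['B', 'S'] or prefix1 in ['E', 'S']
--
-- def get_slot_tokens(query, tags, slots):
--     start_index = list()
--     end_index = list()
--     outputs = dict()
--     for slot in slots:
--         outputs.update({slot: list()})
--     for i in range(len(tags)):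
--         prefix, label = split_tag(tags[i])
--
--         if i == 0:
--             if prefix != "O":
--                 start_index.append(i)
--
--         else:
--             if is_current_chunk_start(tags[i - 1], tags[i]):
--                 start_index.append(i)
--             if is_previous_chunk_end(tags[i - 1], tags[i]):
--                 end_index.append(i - 1)
--             if i == len(tags) - 1 and prefix != "O":
--                 end_index.append(i)
--
--     assert (len(start_index) == len(end_index))
--     for start, end in zip(start_index, end_index):
--         token = query[start:end + 1]
--         labels = tags[start: end + 1]
--         labels = list(set(map(lambda x: x.split("-")[1], labels)))
--         assert (len(labels) == 1)
--         outputs[labels[0]].append(token)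
--     return outputs
-- ===== SOURCE B (Python) =====
-- def split_tag(chunk_tag):
--     if chunk_tag in {'O', ""}:
--         return 'O', None
--     tags = chunk_tag.split('-')
--     if len(tags) == 2:
--         return tags
--     else:
--         return 'O', None
--
-- def is_previous_chunk_end(prev_tag, tag):
--     prefix1, chunk_type1 = split_tag(prev_tag)
--     prefix2, chunk_type2 = split_tag(tag)
--     if prefix1 == 'O':
--         return False
--     if prefix2 == 'O':
--         return prefix1 != 'O'
--     if chunk_type1 != chunk_type2:
--         return True
--     return prefix2 in ['B', 'S'] or prefix1 in ['E', 'S']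
--
-- def is_current_chunk_start(prev_tag, tag):
--     prefix1, chunk_type1 = split_tag(prev_tag)
--     prefix2, chunk_type2 = split_tag(tag)
--     if prefix2 == 'O':
--         return False
--     if prefix1 == 'O':
--         return prefix2 != 'O'
--     if chunk_type1 != chunk_type2:
--         return True
--     return prefix2 in ['B', 'S'] or prefix1 in ['E', 'S']
--
-- def get_slot_tokens(query, tags, slots):
--     # single pass: one open span (start index + its label) instead of two index lists
--     outputs = {slot: [] for slot in slots}
--     open_start = None
--     open_label = None
--     prev = ""          # split_tag("") == ('O', None), so no chunk is open before index 0
--     for i, tag in enumerate(tags):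
--         if open_start is not None and is_previous_chunk_end(prev, tag):
--             outputs[open_label].append(query[open_start:i])
--             open_start = None
--         if is_current_chunk_start(prev, tag):
--             open_start = i
--             open_label = split_tag(tag)[1]
--         prev = tag
--     if open_start is not None:
--         outputs[open_label].append(query[open_start:len(tags)])
--     return outputs
-- ===== Notes on version B (the rewrite author's own statement) =====
-- stated objective: faster
-- what changed: Replaces A's two accumulated index lists, global assert and second zip/set emission loop by a single pass that keeps one open span (start index + label) and emits each span the moment it closes.
import Mathlib
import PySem

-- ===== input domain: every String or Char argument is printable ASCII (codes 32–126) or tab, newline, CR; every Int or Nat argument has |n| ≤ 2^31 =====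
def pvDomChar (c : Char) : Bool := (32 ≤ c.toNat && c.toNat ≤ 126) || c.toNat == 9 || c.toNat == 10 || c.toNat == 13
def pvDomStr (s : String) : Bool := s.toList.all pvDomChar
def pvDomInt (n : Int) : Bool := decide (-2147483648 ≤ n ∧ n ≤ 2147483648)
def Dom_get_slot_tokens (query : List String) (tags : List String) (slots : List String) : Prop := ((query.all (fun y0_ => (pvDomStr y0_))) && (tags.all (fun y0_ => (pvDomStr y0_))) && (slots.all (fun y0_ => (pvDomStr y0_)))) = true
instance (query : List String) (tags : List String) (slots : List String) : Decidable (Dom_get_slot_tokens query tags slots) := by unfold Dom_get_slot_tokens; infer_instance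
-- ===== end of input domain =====

-- B replaces A's two index lists + assert + second zip/set emission loop by a single pass with one open span; return-value equivalence proved on Pre_ (the inputs where A returns).

-- ===== PORT A =====
def split_tag (chunk_tag : String) : String × Option String :=
  if chunk_tag = "O" ∨ chunk_tag = "" then ("O", none)
  else
    let tags := (PySem.Str.split? chunk_tag "-").getD []
    if tags.length = 2 then (tags.getD 0 "", some (tags.getD 1 "")) else ("O", none)

def is_previous_chunk_end (prev_tag : String) (tag : String) : Bool :=
  if (split_tag prev_tag).1 = "O" then false
  else if (split_tag tag).1 = "O" then decide ((split_tag prev_tag).1 ≠ "O")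
  else if (split_tag prev_tag).2 ≠ (split_tag tag).2 then true
  else decide ((split_tag tag).1 = "B" ∨ (split_tag tag).1 = "S" ∨ (split_tag prev_tag).1 = "E" ∨ (split_tag prev_tag).1 = "S")

def is_current_chunk_start (prev_tag : String) (tag : String) : Bool :=
  if (split_tag tag).1 = "O" then false
  else if (split_tag prev_tag).1 = "O" then decide ((split_tag tag).1 ≠ "O")
  else if (split_tag prev_tag).2 ≠ (split_tag tag).2 then true
  else decide ((split_tag tag).1 = "B" ∨ (split_tag tag).1 = "S" ∨ (split_tag prev_tag).1 = "E" ∨ (split_tag prev_tag).1 = "S")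

-- one iteration of A's first loop (index i over range(len(tags)))
def stepA (tags : List String) (st : List Int × List Int) (i : Int) : List Int × List Int :=
  let prefix1 := (split_tag (PySem.List.pyGetD tags i "")).1   -- tags[i], i in range
  if i = 0 then
    (if prefix1 ≠ "O" then st.1 ++ [i] else st.1, st.2)
  else
    let s1 := if is_current_chunk_start (PySem.List.pyGetD tags (i - 1) "") (PySem.List.pyGetD tags i "") then st.1 ++ [i] else st.1
    let e1 := if is_previous_chunk_end (PySem.List.pyGetD tags (i - 1) "") (PySem.List.pyGetD tags i "") then st.2 ++ [i - 1] else st.2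
    let e2 := if i = (tags.length : Int) - 1 ∧ prefix1 ≠ "O" then e1 ++ [i] else e1
    (s1, e2)

-- one iteration of A's second loop: outputs[labels[0]].append(token)
-- x.split('-')[1]: the IndexError (pyGet? = none) is unreachable inside an emitted span;
-- labels[0] read via Set order is determined because the guard forces a singleton;
-- outputs[k] with k absent raises KeyError in Python — excluded by Pre_ (Dict.modify inserts there).
def emitA (query : List String) (tags : List String) (d : PySem.Dict String (List (List String))) (se : Int × Int) : PySem.Dict String (List (List String)) :=
  let token := PySem.List.slice query (some se.1) (some (se.2 + 1))
  let labels0 := PySem.List.slice tags (some se.1) (some (se.2 + 1))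
  let labels : PySem.Set String := PySem.Set.ofList (labels0.map (fun x => ((PySem.List.pyGet? ((PySem.Str.split? x "-").getD []) 1).getD "")))
  if labels.length = 1 then d.modify (labels.getD 0 "") [] (fun l => l ++ [token]) else d

def get_slot_tokens (query : List String) (tags : List String) (slots : List String) : List (String × List (List String)) :=
  let outputs0 : PySem.Dict String (List (List String)) := slots.foldl (fun d s => d.insert s []) PySem.Dict.empty
  let st := (PySem.List.pyRange 0 (tags.length : Int) 1).foldl (stepA tags) ([], [])
  if st.1.length = st.2.length then
    ((st.1.zip st.2).foldl (emitA query tags) outputs0).items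
  else
    outputs0.items   -- assert(len(start_index) == len(end_index)) fails: AssertionError, excluded by Pre_

-- ===== PORT B =====
-- one iteration of B's single pass; state = (outputs, open span (start,label) or none, prev tag)
def stepB (query : List String) (st : PySem.Dict String (List (List String)) × Option (Int × String) × String) (p : Int × String) : PySem.Dict String (List (List String)) × Option (Int × String) × String :=
  let closed :=
    match st.2.1 with
    | some sl =>
      if is_previous_chunk_end st.2.2 p.2 then
        (st.1.modify sl.2 [] (fun l => l ++ [PySem.List.slice query (some sl.1) (some p.1)]), (none : Option (Int × String)))
      else (st.1, st.2.1)
    | none => (st.1, none)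
  if is_current_chunk_start st.2.2 p.2 then
    (closed.1, some (p.1, (split_tag p.2).2.getD ""), p.2)
  else
    (closed.1, closed.2, p.2)

def get_slot_tokens_alt (query : List String) (tags : List String) (slots : List String) : List (String × List (List String)) :=
  let outputs0 : PySem.Dict String (List (List String)) := slots.foldl (fun d s => d.insert s []) PySem.Dict.empty
  let fin := (PySem.List.enumerate tags).foldl (stepB query) (outputs0, none, "")
  (match fin.2.1 with
   | some sl => fin.1.modify sl.2 [] (fun l => l ++ [PySem.List.slice query (some sl.1) (some (tags.length : Int))])
   | none => fin.1).items

-- ===== PRECONDITION & SPEC =====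
-- Pre_ excludes exactly the inputs where the Python A raises: a KeyError when some non-O tag's
-- label is not among slots, and an AssertionError when tags is a one-element list whose tag is
-- non-O (the final-token close sits in the i>0 branch, so the index lists get unbalanced).
def Pre_get_slot_tokens (query : List String) (tags : List String) (slots : List String) : Prop :=
  (∀ t ∈ tags, (split_tag t).1 = "O" ∨ ((split_tag t).2.getD "") ∈ slots)
  ∧ (tags.length = 1 → (split_tag (tags.getD 0 "")).1 = "O")
instance (query : List String) (tags : List String) (slots : List String) : Decidable (Pre_get_slot_tokens query tags slots) := by unfold Pre_get_slot_tokens; infer_instance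

def pvWitness_get_slot_tokens : List String × List String × List String :=
  (["john", "lives", "in", "paris"], ["B-PER", "O", "O", "S-LOC"], ["PER", "LOC"])

def Spec_get_slot_tokens (query : List String) (tags : List String) (slots : List String) (out : List (String × List (List String))) : Prop := out = get_slot_tokens_alt query tags slots
instance (query : List String) (tags : List String) (slots : List String) (out : List (String × List (List String))) : Decidable (Spec_get_slot_tokens query tags slots out) := by unfold Spec_get_slot_tokens; infer_instance

-- ===== CLAIM (what is proved, stated in full; the proofs are below) =====
def Claim_equal_get_slot_tokens : Prop := ∀ (query : List String) (tags : List String) (slots : List String), Dom_get_slot_tokens query tags slots → Pre_get_slot_tokens query tags slots → Spec_get_slot_tokens query tags slots (get_slot_tokens query tags slots)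


-- ===== LEMMAS AND PROOFS =====

-- proof-side helpers: the initial dict, A's loop body without the final-token clause,
-- loop-prefix states of both passes, and the invariant PRel relating them
def initD (slots : List String) : PySem.Dict String (List (List String)) :=
  slots.foldl (fun d s => d.insert s []) PySem.Dict.empty

def stepA' (tags : List String) (st : List Int × List Int) (i : Int) : List Int × List Int :=
  let prefix1 := (split_tag (PySem.List.pyGetD tags i "")).1
  if i = 0 then
    (if prefix1 ≠ "O" then st.1 ++ [i] else st.1, st.2)
  else
    let s1 := if is_current_chunk_start (PySem.List.pyGetD tags (i - 1) "") (PySem.List.pyGetD tags i "") then st.1 ++ [i] else st.1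
    let e1 := if is_previous_chunk_end (PySem.List.pyGetD tags (i - 1) "") (PySem.List.pyGetD tags i "") then st.2 ++ [i - 1] else st.2
    (s1, e1)

def SA' (tags : List String) (i : Nat) : List Int × List Int :=
  (List.range i).foldl (fun st (k : Nat) => stepA' tags st (k : Int)) ([], [])

def SAfull (tags : List String) (i : Nat) : List Int × List Int :=
  (List.range i).foldl (fun st (k : Nat) => stepA tags st (k : Int)) ([], [])

def SB (query tags slots : List String) (i : Nat) : PySem.Dict String (List (List String)) × Option (Int × String) × String :=
  ((PySem.List.enumerate tags).take i).foldl (stepB query) (initD slots, none, "")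

def PRel (query tags slots : List String) (i : Nat) (a : List Int × List Int)
    (b : PySem.Dict String (List (List String)) × Option (Int × String) × String) : Prop :=
  b.2.2 = (if i = 0 then "" else tags.getD (i - 1) "") ∧
  ((b.2.1 = none ∧ a.1.length = a.2.length ∧
      (a.1.zip a.2).foldl (emitA query tags) (initD slots) = b.1 ∧
      (i = 0 ∨ (split_tag (tags.getD (i - 1) "")).1 = "O"))
   ∨ (∃ s' : Nat, ∃ lab : String, b.2.1 = some ((s' : Int), lab) ∧ s' < i ∧
        (∃ S0 : List Int, a.1 = S0 ++ [(s' : Int)] ∧ S0.length = a.2.length ∧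
          (S0.zip a.2).foldl (emitA query tags) (initD slots) = b.1) ∧
        (∀ j : Nat, s' ≤ j → j < i →
          (split_tag (tags.getD j "")).1 ≠ "O" ∧ (split_tag (tags.getD j "")).2 = some lab)))

-- facts about split_tag and the two boundary predicates
theorem split_tag_empty : split_tag "" = ("O", none) := by decide

theorem split_tag_sndD (t : String) (h : (split_tag t).1 ≠ "O") :
    (split_tag t).2 = some ((PySem.List.pyGet? ((PySem.Str.split? t "-").getD []) 1).getD "") := by
  unfold split_tag at h ⊢
  by_cases h0 : t = "O" ∨ t = ""
  · simp [h0] at h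
  · simp only [if_neg h0] at h ⊢
    by_cases h2 : ((PySem.Str.split? t "-").getD []).length = 2
    · obtain ⟨a, b, hab⟩ := List.length_eq_two.mp h2
      simp [hab, pysem]
    · simp [h2] at h

theorem prevEnd_of_O (a b : String) (h : (split_tag a).1 = "O") :
    is_previous_chunk_end a b = false := by
  unfold is_previous_chunk_end
  simp [h]

theorem start_of_O (a b : String) (h : (split_tag a).1 = "O") :
    (is_current_chunk_start a b = true ↔ (split_tag b).1 ≠ "O") := by
  unfold is_current_chunk_start
  split_ifs <;> simp_all

theorem start_nonO (a b : String) (h : is_current_chunk_start a b = true) :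
    (split_tag b).1 ≠ "O" := by
  unfold is_current_chunk_start at h
  split_ifs at h <;> simp_all

theorem prevEnd_of_nonO_O (a b : String) (h1 : (split_tag a).1 ≠ "O")
    (h2 : (split_tag b).1 = "O") : is_previous_chunk_end a b = true := by
  unfold is_previous_chunk_end
  split_ifs <;> simp_all

theorem start_of_O_right (a b : String) (h : (split_tag b).1 = "O") :
    is_current_chunk_start a b = false := by
  unfold is_current_chunk_start
  simp [h]

theorem start_eq_prevEnd (a b : String) (h1 : (split_tag a).1 ≠ "O")
    (h2 : (split_tag b).1 ≠ "O") :
    is_current_chunk_start a b = is_previous_chunk_end a b := by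
  unfold is_current_chunk_start is_previous_chunk_end
  split_ifs <;> simp_all

theorem type_eq_of_not_start (a b : String) (h1 : (split_tag a).1 ≠ "O")
    (h2 : (split_tag b).1 ≠ "O") (h : is_current_chunk_start a b = false) :
    (split_tag a).2 = (split_tag b).2 := by
  unfold is_current_chunk_start at h
  split_ifs at h <;> simp_all

-- set(xs) of a nonempty constant list is the singleton
theorem foldl_add_const (c : String) : ∀ (l : List String), (∀ x ∈ l, x = c) →
    l.foldl PySem.Set.add [c] = [c] := by
  intro l
  induction l with
  | nil => intro _; rfl
  | cons x l ih =>
    intro h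
    have hx : x = c := h x (List.mem_cons_self ..)
    subst hx
    have hadd : PySem.Set.add [x] x = [x] := by
      simp [PySem.Set.add, PySem.Set.contains]
    simp only [List.foldl_cons, hadd]
    exact ih (fun y hy => h y (List.mem_cons_of_mem _ hy))

theorem ofList_const (l : List String) (c : String) (hne : l ≠ [])
    (h : ∀ x ∈ l, x = c) : PySem.Set.ofList l = [c] := by
  cases l with
  | nil => exact absurd rfl hne
  | cons x l =>
    have hx : x = c := h x (List.mem_cons_self ..)
    subst hx
    rw [PySem.Set.ofList_eq_foldl]
    simp only [List.foldl_cons]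
    have h0 : PySem.Set.add ([] : PySem.Set String) x = [x] := by
      simp [PySem.Set.add, PySem.Set.contains]
    rw [h0]
    exact foldl_add_const x l (fun y hy => h y (List.mem_cons_of_mem _ hy))

-- closing a uniformly-labelled span: A's set/assert emission is one modify-append
theorem emitA_close (query tags : List String) (d : PySem.Dict String (List (List String)))
    (s i : Nat) (lab : String) (hsi : s < i) (hin : i ≤ tags.length)
    (hU : ∀ j : Nat, s ≤ j → j < i →
      (split_tag (tags.getD j "")).1 ≠ "O" ∧ (split_tag (tags.getD j "")).2 = some lab) :
    emitA query tags d ((s : Int), (i : Int) - 1)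
      = d.modify lab [] (fun l => l ++ [PySem.List.slice query (some (s : Int)) (some (i : Int))]) := by
  unfold emitA
  have h1 : ((i : Int) - 1) + 1 = (i : Int) := by ring
  simp only [h1]
  rw [PySem.List.slice_natCast tags s i]
  set l0 := List.take (i - s) (List.drop s tags) with hl0
  have hconst : ∀ y ∈ l0.map (fun x => ((PySem.List.pyGet? ((PySem.Str.split? x "-").getD []) 1).getD "")), y = lab := by
    intro y hy
    obtain ⟨x, hxmem, rfl⟩ := List.mem_map.mp hy
    obtain ⟨k, hk, rfl⟩ := List.mem_iff_getElem.mp hxmem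
    have hk1 : k < i - s := by
      have := hk
      simp only [hl0, List.length_take, List.length_drop] at this
      omega
    have hk2 : s + k < tags.length := by
      have := hk
      simp only [hl0, List.length_take, List.length_drop] at this
      omega
    have hx : l0[k] = tags[s + k]'hk2 := by
      simp only [hl0]
      rw [List.getElem_take, List.getElem_drop]
    have hgd : tags.getD (s + k) "" = tags[s + k]'hk2 := List.getD_eq_getElem tags "" hk2
    have hu := hU (s + k) (by omega) (by omega)
    rw [hgd] at hu
    rw [hx]
    have := split_tag_sndD (tags[s + k]'hk2) hu.1
    rw [hu.2] at this
    exact (Option.some.injEq _ _).mp this.symm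
  have hne : l0.map (fun x => ((PySem.List.pyGet? ((PySem.Str.split? x "-").getD []) 1).getD "")) ≠ [] := by
    simp only [ne_eq, List.map_eq_nil_iff, hl0]
    intro hcon
    have : l0.length = 0 := by rw [hl0, hcon]; rfl
    simp only [hl0, List.length_take, List.length_drop] at this
    omega
  rw [ofList_const _ lab hne hconst]
  simp

-- loop-shape bookkeeping
theorem stepA_eq_stepA' (tags : List String) (st : List Int × List Int) (i : Int)
    (h : i = 0 ∨ i ≠ (tags.length : Int) - 1) : stepA tags st i = stepA' tags st i := by
  unfold stepA stepA'
  rcases h with h | h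
  · simp [h]
  · by_cases h0 : i = 0
    · simp [h0]
    · simp only [if_neg h0]
      refine congrArg (Prod.mk _) ?_
      rw [if_neg (fun hc => h hc.1)]

theorem stepA_last (tags : List String) (st : List Int × List Int) (i : Int)
    (h0 : i ≠ 0) (h : i = (tags.length : Int) - 1) :
    stepA tags st i = (if (split_tag (PySem.List.pyGetD tags i "")).1 ≠ "O"
      then ((stepA' tags st i).1, (stepA' tags st i).2 ++ [i]) else stepA' tags st i) := by
  unfold stepA stepA'
  simp only [if_neg h0]
  by_cases hp : (split_tag (PySem.List.pyGetD tags i "")).1 ≠ "O"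
  · rw [if_pos hp]
    refine congrArg (Prod.mk _) ?_
    rw [if_pos ⟨h, hp⟩]
  · rw [if_neg hp]
    refine congrArg (Prod.mk _) ?_
    rw [if_neg (fun hc => hp hc.2)]

theorem stepA'_zero (tags : List String) (st : List Int × List Int) :
    stepA' tags st (0 : Int)
      = (if (split_tag (tags.getD 0 "")).1 ≠ "O" then st.1 ++ [(0 : Int)] else st.1, st.2) := by
  unfold stepA'
  rw [if_pos rfl, PySem.List.pyGetD_zero]

theorem stepA'_pos (tags : List String) (st : List Int × List Int) (i : Nat) (h0 : i ≠ 0) :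
    stepA' tags st (i : Int)
      = (if is_current_chunk_start (tags.getD (i - 1) "") (tags.getD i "") then st.1 ++ [(i : Int)] else st.1,
         if is_previous_chunk_end (tags.getD (i - 1) "") (tags.getD i "") then st.2 ++ [((i - 1 : Nat) : Int)] else st.2) := by
  unfold stepA'
  have hi0 : (i : Int) ≠ 0 := by exact_mod_cast h0
  have hc : (i : Int) - 1 = ((i - 1 : Nat) : Int) := by omega
  rw [if_neg hi0, hc]
  simp only [PySem.List.pyGetD_natCast]

theorem stepB_third (query : List String)
    (b : PySem.Dict String (List (List String)) × Option (Int × String) × String)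
    (p : Int × String) : (stepB query b p).2.2 = p.2 := by
  unfold stepB
  rcases b.2.1 with _ | sl <;> split_ifs <;> rfl

theorem stepB_none_start (query : List String)
    (b : PySem.Dict String (List (List String)) × Option (Int × String) × String)
    (p : Int × String) (hn : b.2.1 = none)
    (hst : is_current_chunk_start b.2.2 p.2 = true) :
    stepB query b p = (b.1, some (p.1, (split_tag p.2).2.getD ""), p.2) := by
  unfold stepB
  rw [hn, hst]
  simp

theorem stepB_none_id (query : List String)
    (b : PySem.Dict String (List (List String)) × Option (Int × String) × String)
    (p : Int × String) (hn : b.2.1 = none)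
    (hst : is_current_chunk_start b.2.2 p.2 = false) :
    stepB query b p = (b.1, none, p.2) := by
  unfold stepB
  rw [hn, hst]
  simp

theorem stepB_close (query : List String)
    (b : PySem.Dict String (List (List String)) × Option (Int × String) × String)
    (p : Int × String) (s : Int) (lab : String) (hs : b.2.1 = some (s, lab))
    (he : is_previous_chunk_end b.2.2 p.2 = true)
    (hst : is_current_chunk_start b.2.2 p.2 = false) :
    stepB query b p = (b.1.modify lab [] (fun l => l ++ [PySem.List.slice query (some s) (some p.1)]), none, p.2) := by
  unfold stepB
  rw [hs, he, hst]
  simp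

theorem stepB_close_start (query : List String)
    (b : PySem.Dict String (List (List String)) × Option (Int × String) × String)
    (p : Int × String) (s : Int) (lab : String) (hs : b.2.1 = some (s, lab))
    (he : is_previous_chunk_end b.2.2 p.2 = true)
    (hst : is_current_chunk_start b.2.2 p.2 = true) :
    stepB query b p = (b.1.modify lab [] (fun l => l ++ [PySem.List.slice query (some s) (some p.1)]),
      some (p.1, (split_tag p.2).2.getD ""), p.2) := by
  unfold stepB
  rw [hs, he, hst]
  simp

theorem stepB_cont (query : List String)
    (b : PySem.Dict String (List (List String)) × Option (Int × String) × String)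
    (p : Int × String) (s : Int) (lab : String) (hs : b.2.1 = some (s, lab))
    (he : is_previous_chunk_end b.2.2 p.2 = false)
    (hst : is_current_chunk_start b.2.2 p.2 = false) :
    stepB query b p = (b.1, some (s, lab), p.2) := by
  unfold stepB
  rw [hs, he, hst]
  simp

theorem SA'_succ (tags : List String) (i : Nat) :
    SA' tags (i + 1) = stepA' tags (SA' tags i) (i : Int) := by
  unfold SA'
  rw [List.range_succ, List.foldl_append]
  rfl

theorem SAfull_succ (tags : List String) (i : Nat) :
    SAfull tags (i + 1) = stepA tags (SAfull tags i) (i : Int) := by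
  unfold SAfull
  rw [List.range_succ, List.foldl_append]
  rfl

theorem SAfull_eq_SA' (tags : List String) : ∀ i : Nat, i + 1 ≤ tags.length →
    SAfull tags i = SA' tags i := by
  intro i
  induction i with
  | zero => intro _; rfl
  | succ i ih =>
    intro h
    rw [SAfull_succ, SA'_succ, ih (by omega)]
    apply stepA_eq_stepA'
    right
    have : (i : Int) < (tags.length : Int) - 1 := by omega
    omega

theorem enum_take_succ {α : Type} (xs : List α) (s : Int) (i : Nat) (h : i < xs.length) :
    (PySem.List.enumerate xs s).take (i + 1)
      = (PySem.List.enumerate xs s).take i ++ [(s + (i : Int), xs[i])] := by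
  induction xs generalizing s i with
  | nil => simp at h
  | cons x xs ih =>
    rw [PySem.List.enumerate_cons]
    cases i with
    | zero => simp
    | succ i =>
      have hi : i < xs.length := by simpa using h
      simp only [List.take_succ_cons, ih (s + 1) i hi]
      have hcast : (s + 1) + (i : Int) = s + ((i : Nat) + 1 : Nat) := by push_cast; ring
      rw [hcast]
      simp

theorem SB_succ (query tags slots : List String) (i : Nat) (h : i < tags.length) :
    SB query tags slots (i + 1) = stepB query (SB query tags slots i) ((i : Int), tags[i]) := by
  unfold SB
  rw [enum_take_succ tags 0 i h, List.foldl_append]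
  simp

-- the one-step simulation: PRel is preserved by one iteration of both loops
theorem rel_step (query tags slots : List String) (i : Nat) (hi : i < tags.length)
    (a : List Int × List Int)
    (b : PySem.Dict String (List (List String)) × Option (Int × String) × String)
    (h : PRel query tags slots i a b) :
    PRel query tags slots (i + 1) (stepA' tags a (i : Int))
      (stepB query b ((i : Int), tags[i])) := by
  obtain ⟨hprev, hcase⟩ := h
  have hgd : tags.getD i "" = tags[i] := List.getD_eq_getElem tags "" hi
  have hprevnew : (stepB query b ((i : Int), tags[i])).2.2
      = (if i + 1 = 0 then "" else tags.getD (i + 1 - 1) "") := by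
    rw [stepB_third, if_neg (by omega : ¬ i + 1 = 0)]
    simpa using hgd.symm
  rcases hcase with ⟨hnone, hlen, hfold, hO⟩ | ⟨s', lab, hsome, hs'i, ⟨S0, hS0, hlenS, hfoldS⟩, hU⟩
  · -- no open span before step i
    have hprevO : (split_tag b.2.2).1 = "O" := by
      by_cases h0 : i = 0
      · rw [hprev, if_pos h0, split_tag_empty]
      · rw [hprev, if_neg h0]
        exact hO.resolve_left h0
    have hend : is_previous_chunk_end b.2.2 tags[i] = false := prevEnd_of_O _ _ hprevO
    by_cases hst : is_current_chunk_start b.2.2 tags[i] = true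
    · -- a chunk opens at index i
      have hpO : (split_tag tags[i]).1 ≠ "O" := start_nonO _ _ hst
      have hB := stepB_none_start query b ((i : Int), tags[i]) hnone hst
      have hA : stepA' tags a (i : Int) = (a.1 ++ [(i : Int)], a.2) := by
        by_cases h0 : i = 0
        · subst h0
          rw [Nat.cast_zero, stepA'_zero, if_pos (by rw [hgd]; exact hpO)]
        · have hpv : tags.getD (i - 1) "" = b.2.2 := by rw [hprev, if_neg h0]
          have hstA : is_current_chunk_start (tags.getD (i - 1) "") (tags.getD i "") = true := by
            rw [hgd, hpv]; exact hst
          have hendA : is_previous_chunk_end (tags.getD (i - 1) "") (tags.getD i "") = false := by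
            rw [hgd, hpv]; exact hend
          rw [stepA'_pos tags a i h0, hstA, hendA]
          simp
      refine ⟨hprevnew, Or.inr ⟨i, (split_tag tags[i]).2.getD "", by rw [hB], by omega,
        ⟨a.1, by rw [hA], by rw [hA]; exact hlen, by rw [hA, hB]; exact hfold⟩, ?_⟩⟩
      intro j hj0 hj1
      have hj : j = i := by omega
      subst hj
      have hsnd := split_tag_sndD tags[j] hpO
      rw [hgd]
      exact ⟨hpO, by simp [hsnd]⟩
    · -- nothing opens: tags[i] has prefix O
      have hst' : is_current_chunk_start b.2.2 tags[i] = false := by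
        cases hb : is_current_chunk_start b.2.2 tags[i]
        · rfl
        · exact absurd hb hst
      have hpO : (split_tag tags[i]).1 = "O" := by
        by_contra hcon
        exact hst ((start_of_O b.2.2 tags[i] hprevO).mpr hcon)
      have hB := stepB_none_id query b ((i : Int), tags[i]) hnone hst'
      have hA : stepA' tags a (i : Int) = (a.1, a.2) := by
        by_cases h0 : i = 0
        · subst h0
          rw [Nat.cast_zero, stepA'_zero, if_neg (by rw [hgd]; simpa using hpO)]
        · have hpv : tags.getD (i - 1) "" = b.2.2 := by rw [hprev, if_neg h0]
          have hstA : is_current_chunk_start (tags.getD (i - 1) "") (tags.getD i "") = false := by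
            rw [hgd, hpv]; exact hst'
          have hendA : is_previous_chunk_end (tags.getD (i - 1) "") (tags.getD i "") = false := by
            rw [hgd, hpv]; exact hend
          rw [stepA'_pos tags a i h0, hstA, hendA]
          simp
      exact ⟨hprevnew, Or.inl ⟨by rw [hB], by rw [hA]; exact hlen,
        by rw [hA, hB]; exact hfold, Or.inr (by rw [Nat.add_sub_cancel, hgd]; exact hpO)⟩⟩
  · -- an open span (s', lab); in particular i ≥ 1 and tags[i-1] is non-O with type lab
    have h0 : i ≠ 0 := by omega
    have hprev' : b.2.2 = tags.getD (i - 1) "" := by rw [hprev, if_neg h0]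
    have hpv : tags.getD (i - 1) "" = b.2.2 := hprev'.symm
    have hUprev := hU (i - 1) (by omega) (by omega)
    have hprevNonO : (split_tag b.2.2).1 ≠ "O" := by rw [hprev']; exact hUprev.1
    have hcast : ((i - 1 : Nat) : Int) = (i : Int) - 1 := by omega
    by_cases hpt : (split_tag tags[i]).1 = "O"
    · -- the span closes and nothing opens
      have hend : is_previous_chunk_end b.2.2 tags[i] = true :=
        prevEnd_of_nonO_O _ _ hprevNonO hpt
      have hst : is_current_chunk_start b.2.2 tags[i] = false := start_of_O_right _ _ hpt
      have hstA : is_current_chunk_start (tags.getD (i - 1) "") (tags.getD i "") = false := by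
        rw [hgd, hpv]; exact hst
      have hendA : is_previous_chunk_end (tags.getD (i - 1) "") (tags.getD i "") = true := by
        rw [hgd, hpv]; exact hend
      have hB := stepB_close query b ((i : Int), tags[i]) _ _ hsome hend hst
      have hA : stepA' tags a (i : Int) = (a.1, a.2 ++ [((i - 1 : Nat) : Int)]) := by
        rw [stepA'_pos tags a i h0, hstA, hendA]
        simp
      refine ⟨hprevnew, Or.inl ⟨by rw [hB], ?_, ?_, Or.inr (by rw [Nat.add_sub_cancel, hgd]; exact hpt)⟩⟩
      · rw [hA, hS0]
        simp [hlenS]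
      · rw [hA, hB, hS0, List.zip_append hlenS, List.foldl_append]
        simp only [List.zip_cons_cons, List.zip_nil_right, List.foldl_cons, List.foldl_nil, hfoldS]
        rw [hcast, emitA_close query tags _ s' i lab hs'i (by omega) hU]
    · -- the current tag is non-O: the chunk either continues or closes-and-reopens
      have hse : is_current_chunk_start b.2.2 tags[i] = is_previous_chunk_end b.2.2 tags[i] :=
        start_eq_prevEnd _ _ hprevNonO hpt
      by_cases hst : is_current_chunk_start b.2.2 tags[i] = true
      · -- close and immediately reopen at i
        have hend : is_previous_chunk_end b.2.2 tags[i] = true := by rw [← hse]; exact hst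
        have hstA : is_current_chunk_start (tags.getD (i - 1) "") (tags.getD i "") = true := by
          rw [hgd, hpv]; exact hst
        have hendA : is_previous_chunk_end (tags.getD (i - 1) "") (tags.getD i "") = true := by
          rw [hgd, hpv]; exact hend
        have hB := stepB_close_start query b ((i : Int), tags[i]) _ _ hsome hend hst
        have hA : stepA' tags a (i : Int) = (a.1 ++ [(i : Int)], a.2 ++ [((i - 1 : Nat) : Int)]) := by
          rw [stepA'_pos tags a i h0, hstA, hendA]
          simp
        refine ⟨hprevnew, Or.inr ⟨i, (split_tag tags[i]).2.getD "", by rw [hB], by omega,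
          ⟨a.1, by rw [hA], ?_, ?_⟩, ?_⟩⟩
        · rw [hA, hS0]
          simp [hlenS]
        · rw [hA, hB, hS0, List.zip_append hlenS, List.foldl_append]
          simp only [List.zip_cons_cons, List.zip_nil_right, List.foldl_cons, List.foldl_nil, hfoldS]
          rw [hcast, emitA_close query tags _ s' i lab hs'i (by omega) hU]
        · intro j hj0 hj1
          have hj : j = i := by omega
          subst hj
          have hsnd := split_tag_sndD tags[j] hpt
          rw [hgd]
          exact ⟨hpt, by simp [hsnd]⟩
      · -- the span continues through i
        have hst' : is_current_chunk_start b.2.2 tags[i] = false := by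
          cases hb : is_current_chunk_start b.2.2 tags[i]
          · rfl
          · exact absurd hb hst
        have hend : is_previous_chunk_end b.2.2 tags[i] = false := by rw [← hse]; exact hst'
        have hstA : is_current_chunk_start (tags.getD (i - 1) "") (tags.getD i "") = false := by
          rw [hgd, hpv]; exact hst'
        have hendA : is_previous_chunk_end (tags.getD (i - 1) "") (tags.getD i "") = false := by
          rw [hgd, hpv]; exact hend
        have hB := stepB_cont query b ((i : Int), tags[i]) _ _ hsome hend hst'
        have hA : stepA' tags a (i : Int) = (a.1, a.2) := by
          rw [stepA'_pos tags a i h0, hstA, hendA]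
          simp
        refine ⟨hprevnew, Or.inr ⟨s', lab, by rw [hB], by omega,
          ⟨S0, by rw [hA]; exact hS0, by rw [hA]; exact hlenS, by rw [hA, hB]; exact hfoldS⟩, ?_⟩⟩
        intro j hj0 hj1
        by_cases hji : j < i
        · exact hU j hj0 hji
        · have hj : j = i := by omega
          subst hj
          have htype : (split_tag (tags.getD (j - 1) "")).2 = (split_tag tags[j]).2 := by
            apply type_eq_of_not_start _ _ hUprev.1 hpt
            rw [← hprev']
            exact hst'
          rw [hgd]
          exact ⟨hpt, by rw [← htype]; exact hUprev.2⟩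

theorem rel_all (query tags slots : List String) :
    ∀ i : Nat, i ≤ tags.length → PRel query tags slots i (SA' tags i) (SB query tags slots i) := by
  intro i
  induction i with
  | zero =>
    intro _
    exact ⟨rfl, Or.inl ⟨rfl, rfl, rfl, Or.inl rfl⟩⟩
  | succ i ih =>
    intro h
    rw [SA'_succ, SB_succ query tags slots i (by omega)]
    exact rel_step query tags slots i (by omega) _ _ (ih (by omega))

-- evaluating the two ports in terms of the loop-prefix states
theorem portA_eval (query tags slots : List String) :
    get_slot_tokens query tags slots
      = (if (SAfull tags tags.length).1.length = (SAfull tags tags.length).2.length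
         then (((SAfull tags tags.length).1.zip (SAfull tags tags.length).2).foldl (emitA query tags) (initD slots)).items
         else (initD slots).items) := by
  unfold get_slot_tokens SAfull initD
  rw [PySem.List.pyRange_zero_nat, List.foldl_map]

theorem portB_eval (query tags slots : List String) :
    get_slot_tokens_alt query tags slots
      = (match (SB query tags slots tags.length).2.1 with
         | some sl => (SB query tags slots tags.length).1.modify sl.2 []
             (fun l => l ++ [PySem.List.slice query (some sl.1) (some (tags.length : Int))])
         | none => (SB query tags slots tags.length).1).items := by
  unfold get_slot_tokens_alt SB initD
  rw [show (PySem.List.enumerate tags).take tags.length = PySem.List.enumerate tags from by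
    rw [← PySem.List.length_enumerate tags 0]
    exact List.take_length]

-- ===== VERDICT (by name: the statement is the Claim_ definition above) =====
theorem get_slot_tokens_spec : Claim_equal_get_slot_tokens := by
  unfold Claim_equal_get_slot_tokens
  intro query tags slots _ hpre
  unfold Spec_get_slot_tokens
  rw [portA_eval, portB_eval]
  by_cases hn2 : 2 ≤ tags.length
  · -- at least two tags: the last loop iteration carries the final-token close
    obtain ⟨m, hm⟩ : ∃ m, tags.length = m + 1 := ⟨tags.length - 1, by omega⟩
    have hm1 : 1 ≤ m := by omega
    have hmlt : m < tags.length := by omega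
    have hgd : tags.getD m "" = tags[m] := List.getD_eq_getElem tags "" hmlt
    have hrel := rel_step query tags slots m hmlt _ _ (rel_all query tags slots m (by omega))
    have hSB : SB query tags slots tags.length
        = stepB query (SB query tags slots m) ((m : Int), tags[m]) := by
      rw [hm]
      exact SB_succ query tags slots m hmlt
    have hSA : SAfull tags tags.length = stepA tags (SA' tags m) (m : Int) := by
      rw [hm, SAfull_succ, SAfull_eq_SA' tags m (by omega)]
    have hlast := stepA_last tags (SA' tags m) (m : Int)
      (by exact_mod_cast Nat.one_le_iff_ne_zero.mp hm1) (by rw [hm]; push_cast; ring)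
    have hpgm : PySem.List.pyGetD tags (m : Int) "" = tags[m] := by
      rw [PySem.List.pyGetD_natCast, hgd]
    set X := stepA' tags (SA' tags m) (m : Int) with hX
    set Y := stepB query (SB query tags slots m) ((m : Int), tags[m]) with hY
    obtain ⟨_, hcase⟩ := hrel
    rcases hcase with ⟨hnone, hlen, hfold, hO⟩ | ⟨s', lab, hsome, hs'i, ⟨S0, hS0, hlenS, hfoldS⟩, hU⟩
    · -- no chunk is open at the end: final-token clause does not fire
      have hpO : (split_tag tags[m]).1 = "O" := by
        have := hO.resolve_left (by omega)
        rwa [Nat.add_sub_cancel, hgd] at this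
      have hifeq : (if (split_tag (PySem.List.pyGetD tags ((m : Nat) : Int) "")).1 ≠ "O"
          then (X.1, X.2 ++ [((m : Nat) : Int)]) else X) = X :=
        if_neg (by rw [hpgm]; simpa using hpO)
      rw [hSA, hlast, hifeq, hSB, hnone, if_pos hlen, hfold]
    · -- a chunk is open at the end: A appends the final end index, B closes in its epilogue
      have hpO : (split_tag tags[m]).1 ≠ "O" := by
        have := (hU m (by omega) (by omega)).1
        rwa [hgd] at this
      have hifeq : (if (split_tag (PySem.List.pyGetD tags ((m : Nat) : Int) "")).1 ≠ "O"
          then (X.1, X.2 ++ [((m : Nat) : Int)]) else X) = (X.1, X.2 ++ [((m : Nat) : Int)]) :=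
        if_pos (by rw [hpgm]; exact hpO)
      rw [hSA, hlast, hifeq, hSB, hsome]
      have hlen2 : X.1.length = (X.2 ++ [(m : Int)]).length := by
        rw [hS0]
        simp [hlenS]
      rw [if_pos hlen2, hS0, List.zip_append hlenS, List.foldl_append]
      simp only [List.zip_cons_cons, List.zip_nil_right, List.foldl_cons, List.foldl_nil, hfoldS]
      have hcast : (m : Int) = ((m + 1 : Nat) : Int) - 1 := by push_cast; ring
      rw [hcast, emitA_close query tags Y.1 s' (m + 1) lab (by omega) (by omega)
        (fun j hj0 hj1 => hU j hj0 (by omega))]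
      rw [hm]
  · -- zero or one tag: no final-token clause; with one non-O tag A would have raised
    have hrel := rel_all query tags slots tags.length le_rfl
    have hSA : SAfull tags tags.length = SA' tags tags.length := by
      rcases (by omega : tags.length = 0 ∨ tags.length = 1) with h1 | h1
      · rw [h1]; rfl
      · rw [h1, SAfull_succ, SA'_succ, SAfull_eq_SA' tags 0 (by omega)]
        exact stepA_eq_stepA' tags _ 0 (Or.inl rfl)
    obtain ⟨_, hcase⟩ := hrel
    rcases hcase with ⟨hnone, hlen, hfold, hO⟩ | ⟨s', lab, hsome, hs'i, _, hU⟩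
    · rw [hSA, hnone, if_pos hlen, hfold]
    · exfalso
      have hl1 : tags.length = 1 := by omega
      have hs0 : s' = 0 := by omega
      have := (hU 0 (by omega) (by omega)).1
      exact this (hpre.2 hl1)
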